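-- pv_equiv track=rewrite | github.com/pgm-githumbi/crack_the_lock | random_prob.py | _u_scramble_except
-- ===== SOURCE A (Python) =====
-- def _u_scramble_except(values:'list[Any]', do_not_scramble:'set[Any]'):
--     """
--     Scrambles the values in `values` except for those in `do_not_scramble`.
--     Values in `values` but not in `do_not_scramble` end up in a different
--     position from where it is in `values` in the returned list.
--     """
--     if len(values) - len(do_not_scramble) == 1:
--         raise ValueError('You cannot have just one displaced value in a list')
--     scrambled = [None] * len(values)
--     swapper:'int' = None # Position in scrambled that I can always swap with
--     for i in range(len(values)):
--         if values[i] in do_not_scramble: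
--             scrambled[i] = values[i]
--             continue
--         if swapper is None:
--             scrambled[i] = values[i]
--             swapper = i
--             continue
--
--         scrambled[i] = scrambled[swapper]
--         scrambled[swapper] = values[i]
--     return scrambled
-- ===== SOURCE B (Python) =====
-- def _u_scramble_except(values:'list[Any]', do_not_scramble:'set[Any]'):
--     if len(values) - len(do_not_scramble) == 1:
--         raise ValueError('You cannot have just one displaced value in a list')
--     movable = [i for i, v in enumerate(values) if v not in do_not_scramble]
--     vals = [values[p] for p in movable]
--     rotated = ([vals[-1]] + vals[:-1]) if vals else []
--     scrambled = list(values)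
--     for i, p in enumerate(movable):
--         scrambled[p] = rotated[i]
--     return scrambled
-- ===== Notes on version B (the rewrite author's own statement) =====
-- stated objective: simpler
-- what changed: Replaces the in-place swapper trick (repeatedly swapping with the first movable slot while scanning) by a direct decomposition: collect movable indices, rotate their values right by one, and scatter them back over a copy of the input.
import Mathlib
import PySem

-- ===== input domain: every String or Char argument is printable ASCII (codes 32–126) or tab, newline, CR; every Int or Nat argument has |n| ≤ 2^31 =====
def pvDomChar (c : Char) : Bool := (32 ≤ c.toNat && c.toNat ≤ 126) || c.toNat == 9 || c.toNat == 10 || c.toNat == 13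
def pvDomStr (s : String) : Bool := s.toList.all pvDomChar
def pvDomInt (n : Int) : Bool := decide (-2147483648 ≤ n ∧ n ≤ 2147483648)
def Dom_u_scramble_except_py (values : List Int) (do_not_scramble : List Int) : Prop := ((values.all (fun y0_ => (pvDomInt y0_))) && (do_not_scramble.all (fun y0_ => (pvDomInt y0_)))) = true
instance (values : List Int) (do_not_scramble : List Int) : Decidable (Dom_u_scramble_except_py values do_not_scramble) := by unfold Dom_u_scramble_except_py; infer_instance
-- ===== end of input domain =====

-- B replaces A's in-place swapper trick by collect-movable-indices / rotate-by-one / scatter (objective: simpler; same cost).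

-- ===== PORT A =====
-- loop body of A: state = (scrambled, swapper); loop indices are always in range, so values[i] is values.getD i 0
def uScrambleStep (values : List Int) (do_not_scramble : List Int)
    (st : List Int × Option Nat) (i : Nat) : List Int × Option Nat :=
  if do_not_scramble.contains (values.getD i 0) then
    (st.1.set i (values.getD i 0), st.2)
  else
    match st.2 with
    | none   => (st.1.set i (values.getD i 0), some i)
    | some s => ((st.1.set i (st.1.getD s 0)).set s (values.getD i 0), st.2)

def u_scramble_except_py (values : List Int) (do_not_scramble : List Int) : List Int :=
  ((List.range values.length).foldl (uScrambleStep values do_not_scramble)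
    (List.replicate values.length 0, none)).1

-- ===== PORT B =====
def u_scramble_except_py_alt (values : List Int) (do_not_scramble : List Int) : List Int :=
  let movable := (List.range values.length).filter
    (fun i => !(do_not_scramble.contains (values.getD i 0)))
  let vals := movable.map (fun p => values.getD p 0)
  let rotated := match vals.getLast? with
    | some x => x :: vals.dropLast
    | none   => []
  (movable.zip rotated).foldl (fun s pr => s.set pr.1 pr.2) values

-- ===== PRECONDITION & SPEC =====
-- Pre_ excludes exactly the inputs on which A raises ValueError (len(values) - len(do_not_scramble) == 1);
-- do_not_scramble models a Python set, so its Python length is the number of distinct elements.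
def Pre_u_scramble_except_py (values : List Int) (do_not_scramble : List Int) : Prop :=
  values.length ≠ (PySem.List.dedup do_not_scramble).length + 1
instance (values : List Int) (do_not_scramble : List Int) : Decidable (Pre_u_scramble_except_py values do_not_scramble) := by unfold Pre_u_scramble_except_py; infer_instance

def pvWitness_u_scramble_except_py : List Int × List Int := ([1, 2, 3], [2])

def Spec_u_scramble_except_py (values : List Int) (do_not_scramble : List Int) (out : List Int) : Prop := out = u_scramble_except_py_alt values do_not_scramble
instance (values : List Int) (do_not_scramble : List Int) (out : List Int) : Decidable (Spec_u_scramble_except_py values do_not_scramble out) := by unfold Spec_u_scramble_except_py; infer_instance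

-- ===== CLAIM (what is proved, stated in full; the proofs are below) =====
def Claim_equal_u_scramble_except_py : Prop := ∀ (values : List Int) (do_not_scramble : List Int), Dom_u_scramble_except_py values do_not_scramble → Pre_u_scramble_except_py values do_not_scramble → Spec_u_scramble_except_py values do_not_scramble (u_scramble_except_py values do_not_scramble)

-- ===== LEMMAS AND PROOFS =====

-- movable indices among the first t positions
def pvMov (values : List Int) (do_not_scramble : List Int) (t : Nat) : List Nat :=
  (List.range t).filter (fun i => !(do_not_scramble.contains (values.getD i 0)))

-- cyclic predecessor inside a list of indices: scan adjacent pairs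
def pvPrevGo : List Nat → Nat → Nat
  | a :: b :: rest, i => if b = i then a else pvPrevGo (b :: rest) i
  | _, _ => 0

def pvPrev (M : List Nat) (i : Nat) : Nat :=
  if M.head? = some i then M.getLast?.getD 0 else pvPrevGo M i

-- pointwise description of the scrambled list after t loop steps of A
def pvOut (values : List Int) (do_not_scramble : List Int) (t i : Nat) : Int :=
  if t ≤ i then 0
  else if do_not_scramble.contains (values.getD i 0) then values.getD i 0
  else values.getD (pvPrev (pvMov values do_not_scramble t) i) 0

lemma pvMov_succ (values do_not_scramble : List Int) (t : Nat) :
    pvMov values do_not_scramble (t + 1) =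
      if do_not_scramble.contains (values.getD t 0) then pvMov values do_not_scramble t
      else pvMov values do_not_scramble t ++ [t] := by
  simp [pvMov, List.range_succ, List.filter_append]
  split_ifs with h <;> simp [h]

lemma mem_pvMov (values do_not_scramble : List Int) (t i : Nat) :
    i ∈ pvMov values do_not_scramble t ↔
      i < t ∧ ¬ do_not_scramble.contains (values.getD i 0) := by
  simp [pvMov, List.mem_filter]

lemma nodup_pvMov (values do_not_scramble : List Int) (t : Nat) :
    (pvMov values do_not_scramble t).Nodup :=
  (List.nodup_range).filter _

lemma pvPrevGo_append (M L : List Nat) (i : Nat) (hi : i ∈ M.tail) :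
    pvPrevGo (M ++ L) i = pvPrevGo M i := by
  induction M with
  | nil => simp at hi
  | cons a M' ih =>
    cases M' with
    | nil => simp at hi
    | cons b rest =>
      by_cases hb : b = i
      · simp [pvPrevGo, hb]
      · have : i ∈ (b :: rest).tail := by
          simp at hi; simp; tauto
        have h2 := ih this
        simpa [pvPrevGo, hb] using h2

lemma pvPrevGo_concat_self (M : List Nat) (t : Nat) (hne : M ≠ []) (ht : t ∉ M) :
    pvPrevGo (M ++ [t]) t = M.getLast?.getD 0 := by
  induction M with
  | nil => simp at hne
  | cons a M' ih =>
    cases M' with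
    | nil => simp [pvPrevGo]
    | cons b rest =>
      have hb : b ≠ t := by simp at ht; tauto
      have ht' : t ∉ b :: rest := by simp at ht ⊢; tauto
      have h2 := ih (by simp) ht'
      simp only [List.cons_append, pvPrevGo]
      rw [if_neg (by simpa using fun h => hb h)]
      simpa using h2

lemma pv_getD_set_self (S : List Int) (j : Nat) (x : Int) (h : j < S.length) :
    (S.set j x).getD j 0 = x := by
  rw [List.getD_eq_getElem _ _ (by simpa using h)]
  simp

lemma pv_getD_set_ne (S : List Int) (i j : Nat) (x : Int) (h : j ≠ i) :
    (S.set j x).getD i 0 = S.getD i 0 := by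
  by_cases hi : i < S.length
  · rw [List.getD_eq_getElem _ _ (by simpa using hi), List.getD_eq_getElem _ _ hi]
    simp [List.getElem_set_ne h]
  · rw [List.getD_eq_default, List.getD_eq_default] <;> simp_all

lemma pv_inv (values do_not_scramble : List Int) (t : Nat) (ht : t ≤ values.length) :
    (((List.range t).foldl (uScrambleStep values do_not_scramble)
      (List.replicate values.length 0, none)).1.length = values.length) ∧
    (((List.range t).foldl (uScrambleStep values do_not_scramble)
      (List.replicate values.length 0, none)).2 = (pvMov values do_not_scramble t).head?) ∧
    ∀ i, i < values.length →
      ((List.range t).foldl (uScrambleStep values do_not_scramble)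
        (List.replicate values.length 0, none)).1.getD i 0 = pvOut values do_not_scramble t i := by
  induction t with
  | zero =>
    refine ⟨by simp, by simp [pvMov], ?_⟩
    intro i hi
    rw [List.getD_eq_getElem _ _ (by simpa using hi)]
    simp [pvOut]
  | succ t ih =>
    have ht' : t ≤ values.length := Nat.le_of_succ_le ht
    have htn : t < values.length := ht
    obtain ⟨hlen, hsw, hpt⟩ := ih ht'
    set st := (List.range t).foldl (uScrambleStep values do_not_scramble)
      (List.replicate values.length 0, none) with hst
    have hstep : (List.range (t+1)).foldl (uScrambleStep values do_not_scramble)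
        (List.replicate values.length 0, none) = uScrambleStep values do_not_scramble st t := by
      rw [List.range_succ, List.foldl_append, List.foldl_cons, List.foldl_nil]
    rw [hstep]
    by_cases hc : do_not_scramble.contains (values.getD t 0)
    · -- protected position
      have hmov : pvMov values do_not_scramble (t+1) = pvMov values do_not_scramble t := by
        rw [pvMov_succ, if_pos hc]
      have hred : uScrambleStep values do_not_scramble st t = (st.1.set t (values.getD t 0), st.2) := by
        simp only [uScrambleStep, if_pos hc]
      rw [hred]
      refine ⟨by simp [hlen], by simp [hmov, hsw], ?_⟩
      intro i hi
      by_cases hit : i = t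
      · rw [hit]
        rw [pv_getD_set_self _ _ _ (by rw [hlen]; exact htn)]
        simp only [pvOut]
        rw [if_neg (by omega : ¬ (t + 1 ≤ t)), if_pos hc]
      · rw [pv_getD_set_ne _ _ _ _ (fun h => hit h.symm), hpt i hi]
        by_cases hlt : t ≤ i
        · have h1 : t + 1 ≤ i := by omega
          simp only [pvOut, hmov, if_pos hlt, if_pos h1]
        · have h1 : ¬ (t + 1 ≤ i) := by omega
          simp only [pvOut, hmov, if_neg hlt, if_neg h1]
    · -- movable position
      have hmov : pvMov values do_not_scramble (t+1) = pvMov values do_not_scramble t ++ [t] := by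
        rw [pvMov_succ, if_neg hc]
      have htm : t ∉ pvMov values do_not_scramble t := by
        rw [mem_pvMov]; omega
      cases hM : pvMov values do_not_scramble t with
      | nil =>
        have hswn : st.2 = none := by rw [hsw, hM]; rfl
        have hred : uScrambleStep values do_not_scramble st t = (st.1.set t (values.getD t 0), some t) := by
          simp only [uScrambleStep, if_neg hc, hswn]
        rw [hred]
        refine ⟨by simp [hlen], by simp [hmov, hM], ?_⟩
        intro i hi
        by_cases hit : i = t
        · rw [hit]
          rw [pv_getD_set_self _ _ _ (by rw [hlen]; exact htn)]
          simp only [pvOut, hmov, hM]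
          rw [if_neg (by omega : ¬ (t + 1 ≤ t)), if_neg hc]
          simp [pvPrev]
        · rw [pv_getD_set_ne _ _ _ _ (fun h => hit h.symm), hpt i hi]
          by_cases hlt : t ≤ i
          · have h1 : t + 1 ≤ i := by omega
            simp only [pvOut, if_pos hlt, if_pos h1]
          · have hpc : do_not_scramble.contains (values.getD i 0) := by
              by_contra hnc
              have : i ∈ pvMov values do_not_scramble t := by
                rw [mem_pvMov]; exact ⟨by omega, hnc⟩
              rw [hM] at this; simp at this
            have h1 : ¬ (t + 1 ≤ i) := by omega
            simp only [pvOut, if_neg hlt, if_neg h1, if_pos hpc]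
      | cons m M' =>
        have hswm : st.2 = some m := by rw [hsw, hM]; rfl
        have hmmem : m ∈ pvMov values do_not_scramble t := by rw [hM]; simp
        have hmlt : m < t := ((mem_pvMov _ _ _ _).1 hmmem).1
        have hmc : ¬ do_not_scramble.contains (values.getD m 0) := ((mem_pvMov _ _ _ _).1 hmmem).2
        have hmn : m < values.length := by omega
        have hmt : m ≠ t := by omega
        have hheadnew : (pvMov values do_not_scramble (t+1)).head? = some m := by
          rw [hmov, hM]; rfl
        have hred : uScrambleStep values do_not_scramble st t =
            ((st.1.set t (st.1.getD m 0)).set m (values.getD t 0), st.2) := by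
          simp only [uScrambleStep, if_neg hc, hswm]
        rw [hred]
        refine ⟨by simp [hlen], by rw [hswm, hheadnew], ?_⟩
        intro i hi
        by_cases him : i = m
        · rw [him]
          rw [pv_getD_set_self _ _ _ (by simpa [hlen] using hmn)]
          have hp : pvPrev (pvMov values do_not_scramble (t+1)) m = t := by
            rw [hmov, hM, pvPrev, if_pos (by rfl), List.getLast?_concat]
            rfl
          simp only [pvOut, hp]
          rw [if_neg (by omega : ¬ (t+1 ≤ m)), if_neg (by simpa using hmc)]
        · rw [pv_getD_set_ne _ _ _ _ (fun h => him h.symm)]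
          by_cases hit : i = t
          · rw [hit]
            have h1 : pvOut values do_not_scramble t m =
                values.getD ((pvMov values do_not_scramble t).getLast?.getD 0) 0 := by
              simp only [pvOut]
              rw [if_neg (by omega : ¬ (t ≤ m)), if_neg hmc]
              simp only [pvPrev]
              rw [if_pos (by rw [hM]; rfl)]
            have h2 : pvPrev (pvMov values do_not_scramble (t+1)) t =
                (pvMov values do_not_scramble t).getLast?.getD 0 := by
              rw [hmov, pvPrev, if_neg]
              · exact pvPrevGo_concat_self _ _ (by rw [hM]; simp) htm
              · rw [hM]; simp; omega
            rw [pv_getD_set_self _ _ _ (by simpa [hlen] using htn), hpt m hmn, h1]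
            simp only [pvOut]
            rw [if_neg (by omega : ¬ (t + 1 ≤ t)), if_neg hc, h2]
          · rw [pv_getD_set_ne _ _ _ _ (fun h => hit h.symm), hpt i hi]
            by_cases hlt : t ≤ i
            · have h1 : t + 1 ≤ i := by omega
              simp only [pvOut, hmov, if_pos hlt, if_pos h1]
            · have h1 : ¬ (t + 1 ≤ i) := by omega
              by_cases hic : do_not_scramble.contains (values.getD i 0)
              · simp only [pvOut, hmov, if_neg hlt, if_neg h1, if_pos hic]
              · have himem : i ∈ pvMov values do_not_scramble t := by
                  rw [mem_pvMov]; exact ⟨by omega, hic⟩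
                have hpp : pvPrev (pvMov values do_not_scramble t ++ [t]) i =
                    pvPrev (pvMov values do_not_scramble t) i := by
                  rw [pvPrev, pvPrev, hM]
                  have hia : i ≠ m := him
                  rw [if_neg (by simp [Ne.symm hia]), if_neg (by simp [Ne.symm hia])]
                  have hmem' : i ∈ (m :: M').tail := by
                    rw [hM] at himem; simp at himem
                    simp; tauto
                  simpa using pvPrevGo_append (m :: M') [t] i hmem'
                simp only [pvOut, hmov, if_neg hlt, if_neg h1, if_neg hic, hpp]

lemma pv_scat_length (ps : List (Nat × Int)) (S : List Int) :
    (ps.foldl (fun s pr => s.set pr.1 pr.2) S).length = S.length := by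
  induction ps generalizing S with
  | nil => rfl
  | cons p ps ih => simpa using ih (S.set p.1 p.2)

lemma pv_scat_notmem (ps : List (Nat × Int)) (S : List Int) (i : Nat)
    (h : i ∉ ps.map Prod.fst) :
    (ps.foldl (fun s pr => s.set pr.1 pr.2) S).getD i 0 = S.getD i 0 := by
  induction ps generalizing S with
  | nil => rfl
  | cons p ps ih =>
    simp only [List.map_cons, List.mem_cons, not_or] at h
    rw [List.foldl_cons, ih _ h.2, pv_getD_set_ne _ _ _ _ (fun he => h.1 he.symm)]

lemma pv_scat_mem (ps : List (Nat × Int)) (S : List Int) (i : Nat) (r : Int)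
    (hnd : (ps.map Prod.fst).Nodup) (hmem : (i, r) ∈ ps) (hi : i < S.length) :
    (ps.foldl (fun s pr => s.set pr.1 pr.2) S).getD i 0 = r := by
  induction ps generalizing S with
  | nil => simp at hmem
  | cons p ps ih =>
    simp only [List.map_cons, List.nodup_cons] at hnd
    rcases List.mem_cons.1 hmem with h | h
    · rw [List.foldl_cons, pv_scat_notmem _ _ _ (by rw [← h] at hnd; exact hnd.1)]
      rw [← h]
      exact pv_getD_set_self _ _ _ (by simpa using hi)
    · rw [List.foldl_cons]
      exact ih (S.set p.1 p.2) hnd.2 h (by simpa using hi)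

lemma pv_zip_aux (values : List Int) (a : Nat) (M' : List Nat) (i : Nat) (hi : i ∈ M') :
    (i, values.getD (pvPrevGo (a :: M') i) 0) ∈
      M'.zip (((a :: M').map (fun p => values.getD p 0)).dropLast) := by
  induction M' generalizing a with
  | nil => simp at hi
  | cons b rest ih =>
    have hne : (b :: rest).map (fun p => values.getD p 0) ≠ [] := by simp
    have hdl : ((a :: b :: rest).map (fun p => values.getD p 0)).dropLast =
        values.getD a 0 :: ((b :: rest).map (fun p => values.getD p 0)).dropLast := by
      rw [List.map_cons, List.dropLast_cons_of_ne_nil hne]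
    by_cases hb : b = i
    · subst hb
      rw [hdl, List.zip_cons_cons]
      have : pvPrevGo (a :: b :: rest) b = a := by simp [pvPrevGo]
      rw [this]
      exact List.mem_cons_self
    · have hi' : i ∈ rest := (List.mem_cons.1 hi).resolve_left (fun h => hb h.symm)
      have h2 := ih b hi'
      have hgo : pvPrevGo (a :: b :: rest) i = pvPrevGo (b :: rest) i := by simp [pvPrevGo, hb]
      rw [hdl, List.zip_cons_cons, hgo]
      exact List.mem_cons_of_mem _ h2

lemma pv_alt_spec (values do_not_scramble : List Int) :
    (u_scramble_except_py_alt values do_not_scramble).length = values.length ∧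
    ∀ i, i < values.length →
      (u_scramble_except_py_alt values do_not_scramble).getD i 0 =
        pvOut values do_not_scramble values.length i := by
  have halt : u_scramble_except_py_alt values do_not_scramble =
      ((pvMov values do_not_scramble values.length).zip
        (match ((pvMov values do_not_scramble values.length).map (fun p => values.getD p 0)).getLast? with
          | some x => x :: ((pvMov values do_not_scramble values.length).map (fun p => values.getD p 0)).dropLast
          | none => [])).foldl (fun s pr => s.set pr.1 pr.2) values := rfl
  set M := pvMov values do_not_scramble values.length with hMdef
  refine ⟨by rw [halt]; exact pv_scat_length _ _, ?_⟩
  intro i hi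
  cases hM : M with
  | nil =>
    -- no movable index at all
    have hmm : ∀ j, j ∈ M ↔ j < values.length ∧ ¬ do_not_scramble.contains (values.getD j 0) :=
      fun j => mem_pvMov values do_not_scramble values.length j
    have hic : do_not_scramble.contains (values.getD i 0) := by
      by_contra hnc
      have : i ∈ M := (hmm i).2 ⟨hi, hnc⟩
      rw [hM] at this; simp at this
    rw [halt, hM]
    simp only [List.zip_nil_left, List.foldl_nil]
    simp only [pvOut, if_neg (by omega : ¬ (values.length ≤ i)), if_pos hic]
  | cons a M' =>
    have hMne : M ≠ [] := by rw [hM]; simp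
    have hvne : (M.map (fun p => values.getD p 0)) ≠ [] := by
      rw [hM]; simp
    obtain ⟨l, hl⟩ : ∃ l, M.getLast? = some l := by
      rw [hM]; exact ⟨_, List.getLast?_eq_some_getLast (by simp)⟩
    have hx : (M.map (fun p => values.getD p 0)).getLast? = some (values.getD l 0) := by
      rw [List.getLast?_map, hl]; rfl
    have hrot : (match ((M.map (fun p => values.getD p 0))).getLast? with
          | some x => x :: (M.map (fun p => values.getD p 0)).dropLast
          | none => []) =
        values.getD l 0 :: (M.map (fun p => values.getD p 0)).dropLast := by
      rw [hx]
    have hrotlen : (values.getD l 0 :: (M.map (fun p => values.getD p 0)).dropLast).length = M.length := by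
      simp
      rw [hM]; simp
    have hfst : (M.zip (values.getD l 0 :: (M.map (fun p => values.getD p 0)).dropLast)).map Prod.fst = M :=
      List.map_fst_zip (by omega)
    have hnd : M.Nodup := nodup_pvMov values do_not_scramble values.length
    rw [halt, hrot]
    by_cases hic : do_not_scramble.contains (values.getD i 0)
    · have hnm : i ∉ M := by
        intro hmem
        exact absurd hic (by simpa using ((mem_pvMov values do_not_scramble values.length i).1 hmem).2)
      rw [pv_scat_notmem _ _ _ (by rw [hfst]; exact hnm)]
      simp only [pvOut, if_neg (by omega : ¬ (values.length ≤ i)), if_pos hic]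
    · have hmem : i ∈ M := (mem_pvMov values do_not_scramble values.length i).2 ⟨hi, by simpa using hic⟩
      have hpair : (i, values.getD (pvPrev M i) 0) ∈
          M.zip (values.getD l 0 :: (M.map (fun p => values.getD p 0)).dropLast) := by
        rcases List.mem_cons.1 (hM ▸ hmem) with h | h
        · -- i is the head a
          have hhead : M.head? = some i := by rw [hM, h]; rfl
          have hp : pvPrev M i = l := by rw [pvPrev, if_pos hhead, hl]; rfl
          rw [hp, hM, List.zip_cons_cons]
          have : a = i := by rw [hM] at hhead; exact Option.some.inj hhead
          rw [this]
          exact List.mem_cons_self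
        · -- i is in the tail
          have ha : a ∉ M' := by rw [hM] at hnd; exact (List.nodup_cons.1 hnd).1
          have hia : i ≠ a := fun he => ha (he ▸ h)
          have hp : pvPrev M i = pvPrevGo M i := by
            rw [pvPrev, if_neg (by rw [hM]; simp [Ne.symm hia])]
          rw [hp, hM, List.zip_cons_cons]
          exact List.mem_cons_of_mem _ (pv_zip_aux values a M' i h)
      rw [pv_scat_mem _ _ _ _ (by rw [hfst]; exact hnd) hpair hi]
      simp only [pvOut, if_neg (by omega : ¬ (values.length ≤ i)), if_neg hic]
      rw [← hMdef]



theorem final_eq (values do_not_scramble : List Int) :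
    u_scramble_except_py values do_not_scramble = u_scramble_except_py_alt values do_not_scramble := by
  obtain ⟨hlenA, -, hptA⟩ := pv_inv values do_not_scramble values.length le_rfl
  obtain ⟨hlenB, hptB⟩ := pv_alt_spec values do_not_scramble
  have hlenA' : (u_scramble_except_py values do_not_scramble).length = values.length := hlenA
  apply List.ext_getElem (by rw [hlenA', hlenB])
  intro i h1 h2
  have hi : i < values.length := by rw [← hlenA']; exact h1
  rw [← List.getD_eq_getElem _ 0 h1, ← List.getD_eq_getElem _ 0 h2]
  have hA : (u_scramble_except_py values do_not_scramble).getD i 0 =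
      pvOut values do_not_scramble values.length i := hptA i hi
  rw [hA, hptB i hi]

-- ===== VERDICT (by name: the statement is the Claim_ definition above) =====
theorem u_scramble_except_py_spec : Claim_equal_u_scramble_except_py := by
  intro values do_not_scramble _ _
  unfold Spec_u_scramble_except_py
  exact final_eq values do_not_scramble
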